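-- pv_equiv track=rewrite | github.com/Nutlope/algorithms | Meetings/trung_1-3-21.py | returnLine1
-- ===== SOURCE A (Python) =====
-- def returnLine1(nestedList):
--     new_arr = []
--     big_set = set()
--     for row in nestedList:
--         new_row = set()
--         s = 0
--         for val in row[:-1]:
--             s += val
--             new_row.add(s)
--             big_set.add(s)
--         new_arr.append(new_row)
--
--     # {1,2,3,4}
--     # {1,2,3,4}
--     # {1,2,3,4}
--     # ...
--     # {1,2,3,4}
--     # 10000 rows, for each index , it check for 10000 times
--     # optimal: for 10000 row, for {1,2,3,4}, freq[prefix] += 1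
--
--     min_crossed = len(nestedList)
--     for index in big_set: # {1,2,3,4}
--         crossed = sum(index not in row for row in new_arr)
--         min_crossed = min(min_crossed, crossed)
--     return min_crossed
-- ===== SOURCE B (Python) =====
-- def returnLine1(nestedList):
--     freq = {}
--     for row in nestedList:
--         seen = set()
--         s = 0
--         for val in row[:-1]:
--             s += val
--             if s not in seen:
--                 seen.add(s)
--                 freq[s] = freq.get(s, 0) + 1
--     return len(nestedList) - max(freq.values(), default=0)
-- ===== Notes on version B (the rewrite author's own statement) =====
-- stated objective: faster
-- what changed: Instead of building per-row prefix-sum sets and then, for each distinct prefix sum, rescanning all rows to count misses, B counts in one pass how many rows contain each prefix sum (dict of frequencies) and returns rows minus the maximum frequency.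
import Mathlib
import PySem

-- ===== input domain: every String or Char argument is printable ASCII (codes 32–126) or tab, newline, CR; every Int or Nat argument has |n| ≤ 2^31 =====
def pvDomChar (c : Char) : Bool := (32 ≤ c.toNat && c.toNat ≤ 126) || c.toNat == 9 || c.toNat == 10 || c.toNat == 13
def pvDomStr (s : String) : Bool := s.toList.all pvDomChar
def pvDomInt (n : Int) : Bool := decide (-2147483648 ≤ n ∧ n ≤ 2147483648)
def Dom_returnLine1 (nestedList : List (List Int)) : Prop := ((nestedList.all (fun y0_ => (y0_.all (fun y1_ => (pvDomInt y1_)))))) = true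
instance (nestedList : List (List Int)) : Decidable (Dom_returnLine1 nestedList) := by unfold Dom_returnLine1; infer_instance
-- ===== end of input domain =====

-- B replaces A's rescan of every row for each distinct prefix sum by a one-pass frequency
-- count of prefix sums (answer = rows − max frequency): objective faster (asymptotic).

-- ===== PORT A =====
def returnLine1 (nestedList : List (List Int)) : Int :=
  -- new_arr/big_set loop: per row, running sum s over row[:-1], adding each prefix to new_row and big_set
  let st := nestedList.foldl
    (fun (acc : List (PySem.Set Int) × PySem.Set Int) row =>
      let inner := (PySem.List.slice row none (some (-1))).foldl
        (fun (st : PySem.Set Int × PySem.Set Int × Int) val =>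
          let s := st.2.2 + val
          (PySem.Set.add st.1 s, PySem.Set.add st.2.1 s, s))
        (PySem.Set.empty, acc.2, 0)
      (acc.1 ++ [inner.1], inner.2.1))
    ([], PySem.Set.empty)
  let newArr := st.1
  let bigSet := st.2
  -- min over big_set of crossed = sum(index not in row for row in new_arr)
  bigSet.foldl
    (fun minCrossed index =>
      min minCrossed
        ((newArr.map (fun row => if PySem.Set.contains row index then (0 : Int) else 1)).sum))
    (nestedList.length : Int)

-- ===== PORT B =====
def returnLine1_alt (nestedList : List (List Int)) : Int :=
  -- one pass: freq[s] = number of rows whose prefix-sum set contains s (per-row 'seen' dedup)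
  let freq := nestedList.foldl
    (fun (freq : PySem.Dict Int Int) row =>
      ((PySem.List.slice row none (some (-1))).foldl
        (fun (st : PySem.Dict Int Int × PySem.Set Int × Int) val =>
          let s := st.2.2 + val
          if PySem.Set.contains st.2.1 s then (st.1, st.2.1, s)
          else (st.1.modify s 0 (· + 1), PySem.Set.add st.2.1 s, s))
        (freq, PySem.Set.empty, 0)).1)
    PySem.Dict.empty
  (nestedList.length : Int) - PySem.List.maxD freq.values (fun x => x) 0

-- ===== PRECONDITION & SPEC =====
def Spec_returnLine1 (nestedList : List (List Int)) (out : Int) : Prop := out = returnLine1_alt nestedList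
instance (nestedList : List (List Int)) (out : Int) : Decidable (Spec_returnLine1 nestedList out) := by unfold Spec_returnLine1; infer_instance

-- ===== CLAIM (what is proved, stated in full; the proofs are below) =====
def Claim_equal_returnLine1 : Prop := ∀ (nestedList : List (List Int)), Dom_returnLine1 nestedList → Spec_returnLine1 nestedList (returnLine1 nestedList)

-- ===== LEMMAS AND PROOFS =====

def pvPrefs : Int → List Int → List Int
  | _, [] => []
  | s, v :: vs => (s + v) :: pvPrefs (s + v) vs

theorem pvInnerA (l : List Int) (s : Int) (nr bs : PySem.Set Int) :
    l.foldl
      (fun (st : PySem.Set Int × PySem.Set Int × Int) val =>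
        let s := st.2.2 + val
        (PySem.Set.add st.1 s, PySem.Set.add st.2.1 s, s)) (nr, bs, s)
    = (PySem.Set.update nr (pvPrefs s l), PySem.Set.update bs (pvPrefs s l), s + l.sum) := by
  induction l generalizing s nr bs with
  | nil => simp [pvPrefs, PySem.Set.update]
  | cons v vs ih =>
    simp only [List.foldl_cons, pvPrefs, List.sum_cons, PySem.Set.update] at *
    rw [ih]
    simp [add_assoc]

def pvP (row : List Int) : List Int := pvPrefs 0 (PySem.List.slice row none (some (-1)))

theorem pvOuterA (L : List (List Int)) (arr : List (PySem.Set Int)) (bs : PySem.Set Int) :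
    L.foldl
      (fun (acc : List (PySem.Set Int) × PySem.Set Int) row =>
        let inner := (PySem.List.slice row none (some (-1))).foldl
          (fun (st : PySem.Set Int × PySem.Set Int × Int) val =>
            let s := st.2.2 + val
            (PySem.Set.add st.1 s, PySem.Set.add st.2.1 s, s))
          (PySem.Set.empty, acc.2, 0)
        (acc.1 ++ [inner.1], inner.2.1)) (arr, bs)
    = (arr ++ L.map (fun r => PySem.Set.ofList (pvP r)), PySem.Set.update bs (L.flatMap pvP)) := by
  induction L generalizing arr bs with
  | nil => simp [PySem.Set.update]
  | cons r L ih =>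
    simp only [List.foldl_cons, List.map_cons, List.flatMap_cons]
    rw [pvInnerA]
    rw [ih]
    simp [pvP, PySem.Set.update, List.foldl_append, PySem.Set.empty, PySem.Set.ofList]

def pvGStep (st : PySem.Dict Int Int × PySem.Set Int) (p : Int) : PySem.Dict Int Int × PySem.Set Int :=
  if PySem.Set.contains st.2 p then st else (st.1.modify p 0 (· + 1), PySem.Set.add st.2 p)

theorem pvInnerB (l : List Int) (s : Int) (d : PySem.Dict Int Int) (sn : PySem.Set Int) :
    l.foldl
      (fun (st : PySem.Dict Int Int × PySem.Set Int × Int) val =>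
        let s := st.2.2 + val
        if PySem.Set.contains st.2.1 s then (st.1, st.2.1, s)
        else (st.1.modify s 0 (· + 1), PySem.Set.add st.2.1 s, s)) (d, sn, s)
    = (((pvPrefs s l).foldl pvGStep (d, sn)).1, ((pvPrefs s l).foldl pvGStep (d, sn)).2, s + l.sum) := by
  induction l generalizing s d sn with
  | nil => simp [pvPrefs]
  | cons v vs ih =>
    simp only [List.foldl_cons, pvPrefs, List.sum_cons]
    by_cases h : PySem.Set.contains sn (s + v) = true
    · simp only [h, if_pos, pvGStep]
      rw [ih]
      simp [add_assoc]
    · simp only [pvGStep, h]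
      rw [ih]
      simp [add_assoc]

theorem pvUpdatePrefix (q : List Int) (sn : PySem.Set Int) : ∃ t, PySem.Set.update sn q = sn ++ t := by
  induction q generalizing sn with
  | nil => exact ⟨[], by simp [PySem.Set.update]⟩
  | cons x q ih =>
    have hstep : PySem.Set.update sn (x :: q) = PySem.Set.update (PySem.Set.add sn x) q := rfl
    by_cases h : x ∈ sn
    · obtain ⟨t, ht⟩ := ih sn
      refine ⟨t, ?_⟩
      rw [hstep]
      have : PySem.Set.add sn x = sn := by simp [PySem.Set.add, PySem.Set.contains, h]
      rw [this, ht]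
    · obtain ⟨t, ht⟩ := ih (sn ++ [x])
      refine ⟨x :: t, ?_⟩
      rw [hstep]
      have : PySem.Set.add sn x = sn ++ [x] := by simp [PySem.Set.add, PySem.Set.contains, h]
      rw [this, ht, List.append_assoc]
      rfl

theorem pvGFold (q : List Int) (d : PySem.Dict Int Int) (sn : PySem.Set Int) :
    q.foldl pvGStep (d, sn)
    = (((PySem.Set.update sn q).drop sn.length).foldl (fun d p => d.modify p 0 (· + 1)) d,
       PySem.Set.update sn q) := by
  induction q generalizing d sn with
  | nil => simp [PySem.Set.update]
  | cons p q ih =>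
    have hu : PySem.Set.update sn (p :: q) = PySem.Set.update (PySem.Set.add sn p) q := rfl
    by_cases h : p ∈ sn
    · have hc : PySem.Set.contains sn p = true := by simp [PySem.Set.contains, h]
      have ha : PySem.Set.add sn p = sn := by simp [PySem.Set.add, PySem.Set.contains, h]
      simp only [List.foldl_cons, pvGStep, hc, if_pos]
      rw [ih, hu, ha]
    · have hc : ¬ PySem.Set.contains sn p = true := by simp [PySem.Set.contains, h]
      have ha : PySem.Set.add sn p = sn ++ [p] := by simp [PySem.Set.add, PySem.Set.contains, h]
      simp only [List.foldl_cons, pvGStep, hc, if_neg, Bool.not_eq_true]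
      rw [ih, hu, ha]
      obtain ⟨t, ht⟩ := pvUpdatePrefix q (sn ++ [p])
      rw [ht, List.append_assoc, List.drop_left, List.length_append]
      have h2 : (sn ++ ([p] ++ t)).drop sn.length = [p] ++ t := by
        rw [← List.append_assoc] at *
        rw [show sn ++ [p] ++ t = sn ++ ([p] ++ t) by rw [List.append_assoc], List.drop_left]
      rw [← List.append_assoc, show sn.length + [p].length = (sn ++ [p]).length by simp,
        List.drop_left]
      simp

theorem pvUpdateFoldlAdd (q : List Int) (s t : PySem.Set Int) :
    PySem.Set.update s (q.foldl PySem.Set.add t) = PySem.Set.update (PySem.Set.update s t) q := by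
  induction q generalizing t with
  | nil => rfl
  | cons x q ih =>
    show PySem.Set.update s (q.foldl PySem.Set.add (PySem.Set.add t x))
        = PySem.Set.update (PySem.Set.add (PySem.Set.update s t) x) q
    rw [ih]
    congr 1
    by_cases h : x ∈ t
    · have ha : PySem.Set.add t x = t := by simp [PySem.Set.add, PySem.Set.contains, h]
      have hm : x ∈ PySem.Set.update s t := by
        have := (PySem.Set.mem_foldl_add t (fun b => b) s x).2 (Or.inr ⟨x, h, rfl⟩)
        simpa [PySem.Set.update] using this
      have h2 : PySem.Set.add (PySem.Set.update s t) x = PySem.Set.update s t := by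
        simp [PySem.Set.add, PySem.Set.contains, hm]
      rw [ha, h2]
    · have ha : PySem.Set.add t x = t ++ [x] := by simp [PySem.Set.add, PySem.Set.contains, h]
      rw [ha]
      show PySem.Set.update s (t ++ [x]) = _
      rw [PySem.Set.update, List.foldl_append]
      rfl

theorem pvUpdateOfList (q : List Int) (s : PySem.Set Int) :
    PySem.Set.update s (PySem.Set.ofList q) = PySem.Set.update s q := by
  have := pvUpdateFoldlAdd q s PySem.Set.empty
  simpa [PySem.Set.ofList, PySem.Set.update, PySem.Set.empty] using this

theorem pvOuterB (L : List (List Int)) (d : PySem.Dict Int Int) :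
    L.foldl
      (fun (freq : PySem.Dict Int Int) row =>
        ((PySem.List.slice row none (some (-1))).foldl
          (fun (st : PySem.Dict Int Int × PySem.Set Int × Int) val =>
            let s := st.2.2 + val
            if PySem.Set.contains st.2.1 s then (st.1, st.2.1, s)
            else (st.1.modify s 0 (· + 1), PySem.Set.add st.2.1 s, s))
          (freq, PySem.Set.empty, 0)).1) d
    = (L.flatMap (fun r => PySem.Set.ofList (pvP r))).foldl (fun d p => d.modify p 0 (· + 1)) d := by
  induction L generalizing d with
  | nil => simp
  | cons r L ih =>
    simp only [List.foldl_cons, List.flatMap_cons, List.foldl_append]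
    rw [pvInnerB, pvGFold]
    rw [ih]
    congr 1

theorem pvCount (L : List (List Int)) (k : Int) :
    (L.flatMap (fun r => PySem.Set.ofList (pvP r))).count k
    = L.countP (fun r => decide (k ∈ pvP r)) := by
  induction L with
  | nil => simp
  | cons r L ih =>
    rw [List.flatMap_cons, List.count_append, ih, List.countP_cons]
    have h1 : (PySem.Set.ofList (pvP r)).count k = if k ∈ pvP r then 1 else 0 := by
      rw [List.Nodup.count (PySem.Set.nodup_ofList (pvP r))]
      simp [PySem.Set.mem_ofList]
    rw [h1]
    by_cases h : k ∈ pvP r <;> simp [h] <;> try omega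

theorem pvCrossed (L : List (List Int)) (k : Int) :
    ((L.map (fun r => PySem.Set.ofList (pvP r))).map
        (fun row => if PySem.Set.contains row k then (0 : Int) else 1)).sum
    = (L.length : Int) - (L.countP (fun r => decide (k ∈ pvP r)) : Int) := by
  induction L with
  | nil => simp
  | cons r L ih =>
    simp only [List.map_cons, List.sum_cons, List.countP_cons, List.length_cons, ih]
    have hc : PySem.Set.contains (PySem.Set.ofList (pvP r)) k = decide (k ∈ pvP r) := by
      simp [PySem.Set.contains, PySem.Set.mem_ofList]
    rw [hc]
    by_cases h : k ∈ pvP r <;> simp [h] <;> try ring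

theorem pvMinMax (K : List Int) (c : Int → Int) (n a : Int) :
    K.foldl (fun m k => min m (n - c k)) (n - a)
    = n - K.foldl (fun m k => max m (c k)) a := by
  induction K generalizing a with
  | nil => rfl
  | cons k K ih =>
    simp only [List.foldl_cons]
    rw [show min (n - a) (n - c k) = n - max a (c k) by omega, ih]

theorem pvKeysEq (L : List (List Int)) (s : PySem.Set Int) :
    PySem.Set.update s (L.flatMap (fun r => PySem.Set.ofList (pvP r)))
    = PySem.Set.update s (L.flatMap pvP) := by
  induction L generalizing s with
  | nil => rfl
  | cons r L ih =>
    simp only [List.flatMap_cons, PySem.Set.update, List.foldl_append]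
    rw [show ∀ (u : PySem.Set Int) q, List.foldl PySem.Set.add u q = PySem.Set.update u q from fun _ _ => rfl,
        show ∀ (u : PySem.Set Int) q, List.foldl PySem.Set.add u q = PySem.Set.update u q from fun _ _ => rfl]
    rw [pvUpdateOfList]
    exact ih _

-- ===== VERDICT (by name: the statement is the Claim_ definition above) =====
theorem returnLine1_spec : Claim_equal_returnLine1 := by
  intro nl _
  unfold Spec_returnLine1 returnLine1 returnLine1_alt
  simp only [pvOuterA, pvOuterB]
  rw [← PySem.Dict.counter_eq_foldl]
  have hval : (PySem.Dict.counter (nl.flatMap (fun r => PySem.Set.ofList (pvP r)))).values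
      = (PySem.Set.ofList (nl.flatMap pvP)).map
          (fun k => ((nl.countP (fun r => decide (k ∈ pvP r))) : Int)) := by
    show ((PySem.Dict.counter (nl.flatMap (fun r => PySem.Set.ofList (pvP r)))).items.map (·.2)) = _
    rw [PySem.Dict.items_counter]
    have hk : PySem.Set.ofList (nl.flatMap (fun r => PySem.Set.ofList (pvP r)))
        = PySem.Set.ofList (nl.flatMap pvP) := by
      rw [← PySem.Set.update_nil_left, ← PySem.Set.update_nil_left]
      exact pvKeysEq nl []
    rw [hk, List.map_map]
    refine List.map_congr_left (fun k _ => ?_)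
    simp only [Function.comp]
    rw [pvCount]
  rw [hval]
  have hbs : PySem.Set.update PySem.Set.empty (List.flatMap pvP nl)
      = PySem.Set.ofList (List.flatMap pvP nl) := PySem.Set.update_nil_left _
  rw [hbs]
  have hcr : ∀ k : Int,
      (List.map (fun row => if PySem.Set.contains row k then (0 : Int) else 1)
        ([] ++ List.map (fun r => PySem.Set.ofList (pvP r)) nl)).sum
      = (nl.length : Int) - (nl.countP (fun r => decide (k ∈ pvP r)) : Int) := by
    intro k
    rw [List.nil_append]
    exact pvCrossed nl k
  simp only [hcr]
  cases hK : PySem.Set.ofList (List.flatMap pvP nl) with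
  | nil =>
    simp [PySem.List.maxD, PySem.List.max?]
  | cons k0 ks =>
    simp only [List.foldl_cons, List.map_cons, PySem.List.maxD, PySem.List.max?_id_cons,
      Option.getD_some, List.foldl_map]
    have h0 : (0 : Int) ≤ (nl.countP (fun r => decide (k0 ∈ pvP r)) : Int) := Int.natCast_nonneg _
    rw [show min ((nl.length : Int)) ((nl.length : Int) - (nl.countP (fun r => decide (k0 ∈ pvP r)) : Int))
        = (nl.length : Int) - (nl.countP (fun r => decide (k0 ∈ pvP r)) : Int) by omega]
    exact pvMinMax ks _ _ _
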